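-- pv_equiv track=rewrite | github.com/clumsy/kattis | src/communication.py | solve
-- ===== SOURCE A (Python) =====
-- def solve(x):
--     res = i = p = 0
--     while i < 8:
--         c = (x >> i) & 1
--         res |= (c ^ p) << i
--         p = c ^ p
--         i += 1
--     return res
-- ===== SOURCE B (Python) =====
-- def solve(x):
--     # bit-parallel inclusive prefix-XOR over the low 8 bits
--     y = x & 0xFF
--     y ^= y << 1
--     y ^= y << 2
--     y ^= y << 4
--     return y & 0xFF
-- ===== Notes on version B (the rewrite author's own statement) =====
-- stated objective: alternative
-- what changed: Replaces the iterative bit-by-bit running-XOR loop with a branch-free bit-parallel prefix-XOR (three shift-XOR steps on the masked low byte).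
import Mathlib
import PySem

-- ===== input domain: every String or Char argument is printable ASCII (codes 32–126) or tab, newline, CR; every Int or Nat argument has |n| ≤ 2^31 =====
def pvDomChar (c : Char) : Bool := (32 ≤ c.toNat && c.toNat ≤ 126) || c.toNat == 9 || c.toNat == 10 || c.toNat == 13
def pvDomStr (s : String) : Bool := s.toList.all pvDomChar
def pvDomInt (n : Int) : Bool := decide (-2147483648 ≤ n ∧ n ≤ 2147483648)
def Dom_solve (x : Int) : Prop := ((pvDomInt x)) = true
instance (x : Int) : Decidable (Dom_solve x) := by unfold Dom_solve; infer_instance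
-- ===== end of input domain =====

-- B replaces A's iterative bit-by-bit running-XOR loop with a branch-free
-- bit-parallel prefix-XOR on the masked low byte (alternative algorithm).


-- ===== PORT A =====
-- 'while i < 8' loop; fuel 8 suffices since i starts at 0 and increases by 1
def solveLoop (x : Int) : Nat → Nat → Int → Int → Int
  | 0, _, res, _ => res
  | fuel+1, i, res, p =>
    if i < 8 then
      let c := PySem.Int.band (x >>> i) 1
      solveLoop x fuel (i+1) (PySem.Int.bor res ((PySem.Int.bxor c p) <<< i)) (PySem.Int.bxor c p)
    else res

def solve (x : Int) : Int := solveLoop x 8 0 0 0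

-- ===== PORT B =====
def solve_alt (x : Int) : Int :=
  let y := PySem.Int.band x 255
  let y := PySem.Int.bxor y (y <<< 1)
  let y := PySem.Int.bxor y (y <<< 2)
  let y := PySem.Int.bxor y (y <<< 4)
  PySem.Int.band y 255

-- ===== PRECONDITION & SPEC =====
def Spec_solve (x : Int) (out : Int) : Prop := out = solve_alt x
instance (x : Int) (out : Int) : Decidable (Spec_solve x out) := by unfold Spec_solve; infer_instance

-- ===== CLAIM (what is proved, stated in full; the proofs are below) =====
def Claim_equal_solve : Prop := ∀ (x : Int), Dom_solve x → Spec_solve x (solve x)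

-- ===== LEMMAS AND PROOFS =====

theorem nat_and_255 (n : Nat) : n &&& 255 = n % 256 := by
  have := Nat.and_two_pow_sub_one_eq_mod n 8
  norm_num at this
  exact this

theorem band_255_eq_emod (x : Int) : PySem.Int.band x 255 = x % 256 := by
  unfold PySem.Int.band
  split_ifs with h1 h2 h3
  · rw [show ((255:Int).toNat) = 255 from rfl, nat_and_255]; omega
  · exact absurd (by norm_num) h2
  · rw [show ((255:Int).toNat) = 255 from rfl, Nat.and_comm, nat_and_255]; omega
  · exact absurd (by norm_num) h3

theorem bit_per (q r : Int) (h0 : 0 ≤ r) (h1 : r < 256) (i : Nat) (hi : i < 8) :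
    PySem.Int.band ((256*q+r) >>> i) 1 = PySem.Int.band (r >>> i) 1 := by
  rw [PySem.Int.band_one, PySem.Int.band_one,
      PySem.Int.mod_eq_emod_of_pos (by norm_num), PySem.Int.mod_eq_emod_of_pos (by norm_num),
      Int.shiftRight_eq_div_pow, Int.shiftRight_eq_div_pow]
  interval_cases i <;> norm_num <;> omega

theorem solve_per (q r : Int) (h0 : 0 ≤ r) (h1 : r < 256) : solve (256*q+r) = solve r := by
  have b0 := bit_per q r h0 h1 0 (by norm_num)
  have b1 := bit_per q r h0 h1 1 (by norm_num)
  have b2 := bit_per q r h0 h1 2 (by norm_num)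
  have b3 := bit_per q r h0 h1 3 (by norm_num)
  have b4 := bit_per q r h0 h1 4 (by norm_num)
  have b5 := bit_per q r h0 h1 5 (by norm_num)
  have b6 := bit_per q r h0 h1 6 (by norm_num)
  have b7 := bit_per q r h0 h1 7 (by norm_num)
  simp only [solve, solveLoop, b0, b1, b2, b3, b4, b5, b6, b7]

theorem solve_alt_per (q r : Int) (h0 : 0 ≤ r) (h1 : r < 256) :
    solve_alt (256*q+r) = solve_alt r := by
  simp only [solve_alt, band_255_eq_emod]
  have : (256*q+r) % 256 = r % 256 := by omega
  rw [this]

set_option maxRecDepth 100000 in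
set_option maxHeartbeats 1000000 in
theorem key_fin : ∀ r : Fin 256, solve (r : Int) = solve_alt (r : Int) := by decide

theorem key (r : Int) (h0 : 0 ≤ r) (h1 : r < 256) : solve r = solve_alt r := by
  have h : r = ((⟨r.toNat, by omega⟩ : Fin 256) : Int) := by simp; omega
  rw [h]; exact key_fin _

-- ===== VERDICT (by name: the statement is the Claim_ definition above) =====
theorem solve_spec : Claim_equal_solve := by
  intro x _
  unfold Spec_solve
  have hx : x = 256 * (x / 256) + x % 256 := by omega
  rw [hx, solve_per _ _ (by omega) (by omega), solve_alt_per _ _ (by omega) (by omega)]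
  exact key _ (by omega) (by omega)
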